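-- pv_equiv track=rewrite | github.com/Yeewon/Algorithm | 프로그래머스/LEVEL2/Lv2_전화번호 목록.py | solution
-- ===== SOURCE A (Python) =====
-- def solution(book):
--     for i in range(len(book)-1):
--         for j in range(i+1,len(book)):
--             if len(book[j]) >= len(book[i]) and book[j].startswith(book[i]):
--                 return False
--             elif len(book[j]) < len(book[i]) and book[i].startswith(book[j]):
--                 return False
--     return True
-- ===== SOURCE B (Python) =====
-- def solution(book):
--     seen = set()
--     for num in book:
--         if num in seen:
--             return False
--         seen.add(num)
--     for num in book:
--         for k in range(len(num)):
--             if num[:k] in seen: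
--                 return False
--     return True
-- ===== Notes on version B (the rewrite author's own statement) =====
-- stated objective: alternative
-- what changed: Replaces A's all-pairs startswith scan by a set of the numbers: one pass detects duplicates, then each number's proper prefixes are looked up in the set.
import Mathlib
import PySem

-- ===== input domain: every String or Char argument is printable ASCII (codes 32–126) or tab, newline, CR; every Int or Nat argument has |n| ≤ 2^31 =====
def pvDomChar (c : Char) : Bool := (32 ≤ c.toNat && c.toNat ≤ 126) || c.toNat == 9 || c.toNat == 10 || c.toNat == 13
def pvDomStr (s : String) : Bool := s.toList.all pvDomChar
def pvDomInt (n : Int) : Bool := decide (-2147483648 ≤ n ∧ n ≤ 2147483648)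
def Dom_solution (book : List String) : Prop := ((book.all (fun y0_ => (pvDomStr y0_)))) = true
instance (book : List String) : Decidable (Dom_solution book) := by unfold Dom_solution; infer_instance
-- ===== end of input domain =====

-- B replaces A's pairwise startswith scan by a set of the numbers: a duplicate scan plus,
-- for each number, a membership test of each of its proper prefixes (objective: alternative).


-- ===== PORT A =====
-- early 'return False' in the nested loops is encoded as List.any; final 'return True' as the negation
def solution (book : List String) : Bool :=
  !((PySem.List.pyRange 0 ((book.length : Int) - 1) 1).any (fun i =>
      (PySem.List.pyRange (i + 1) (book.length : Int) 1).any (fun j =>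
        let bi := PySem.List.pyGetD book i ""
        let bj := PySem.List.pyGetD book j ""
        (decide (PySem.Str.len bi ≤ PySem.Str.len bj) && PySem.Str.startswith bj bi) ||
          (decide (PySem.Str.len bj < PySem.Str.len bi) && PySem.Str.startswith bi bj))))

-- ===== PORT B =====
-- first loop of Source B: returns none on a duplicate ('return False'), else the final 'seen' set
def pvScan : List String → PySem.Set String → Option (PySem.Set String)
  | [], seen => some seen
  | num :: rest, seen =>
      if PySem.Set.contains seen num then none
      else pvScan rest (PySem.Set.add seen num)

def solution_alt (book : List String) : Bool :=
  match pvScan book PySem.Set.empty with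
  | none => false
  | some seen =>
      !(book.any (fun num =>
          (PySem.List.pyRange 0 (PySem.Str.len num) 1).any (fun k =>
            PySem.Set.contains seen (PySem.Str.slice num none (some k)))))

-- ===== PRECONDITION & SPEC =====
def Spec_solution (book : List String) (out : Bool) : Prop := out = solution_alt book
instance (book : List String) (out : Bool) : Decidable (Spec_solution book out) := by unfold Spec_solution; infer_instance

-- ===== CLAIM (what is proved, stated in full; the proofs are below) =====
def Claim_equal_solution : Prop := ∀ (book : List String), Dom_solution book → Spec_solution book (solution book)

-- ===== LEMMAS AND PROOFS =====

-- one number is a prefix of the other: the "bad pair" relation both programs search for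
def RelPfx (a b : String) : Prop := a.toList <+: b.toList ∨ b.toList <+: a.toList

-- what A's nested loops decide
def PA (book : List String) : Prop :=
  ∀ (i j : Nat) (h1 : i < j) (h2 : j < book.length),
    ¬ RelPfx (book[i]'(Nat.lt_trans h1 h2)) (book[j]'h2)

-- what B decides: no duplicates and no element equals a proper prefix of another
def PB (book : List String) : Prop :=
  book.Nodup ∧ ∀ num ∈ book, ∀ k : Nat, k < num.toList.length →
    ∀ t ∈ book, t.toList ≠ num.toList.take k

-- A's branch condition detects exactly RelPfx
lemma cond_iff (a b : String) :
    ((decide (PySem.Str.len a ≤ PySem.Str.len b) && PySem.Str.startswith b a) ||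
      (decide (PySem.Str.len b < PySem.Str.len a) && PySem.Str.startswith a b)) = true ↔ RelPfx a b := by
  simp only [Bool.or_eq_true, Bool.and_eq_true, decide_eq_true_eq, PySem.Str.startswith_eq,
    PySem.Chars.startswith_iff, PySem.Str.len_eq, RelPfx]
  constructor
  · rintro (⟨_, h⟩ | ⟨_, h⟩)
    · exact Or.inl h
    · exact Or.inr h
  · rintro (h | h)
    · exact Or.inl ⟨by exact_mod_cast h.length_le, h⟩
    · by_cases hl : b.toList.length < a.toList.length
      · exact Or.inr ⟨by exact_mod_cast hl, h⟩
      · left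
        have hba : b.toList = a.toList := h.eq_of_length_le (by omega)
        exact ⟨by omega, hba ▸ List.prefix_refl _⟩

lemma solA_true_iff (book : List String) : solution book = true ↔ PA book := by
  have hrw : solution book = true ↔
      ¬ (∃ i : Int, (0 ≤ i ∧ i < (book.length : Int) - 1) ∧
          ∃ j : Int, (i + 1 ≤ j ∧ j < (book.length : Int)) ∧
            ((decide (PySem.Str.len (PySem.List.pyGetD book i "") ≤ PySem.Str.len (PySem.List.pyGetD book j "")) &&
                PySem.Str.startswith (PySem.List.pyGetD book j "") (PySem.List.pyGetD book i "")) ||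
              (decide (PySem.Str.len (PySem.List.pyGetD book j "") < PySem.Str.len (PySem.List.pyGetD book i "")) &&
                PySem.Str.startswith (PySem.List.pyGetD book i "") (PySem.List.pyGetD book j ""))) = true) := by
    simp [solution, List.any_eq_true, PySem.List.mem_pyRange_one, and_assoc]
  rw [hrw]
  constructor
  · intro h i j h1 h2 hrel
    apply h
    refine ⟨(i : Int), ⟨by positivity, by omega⟩, (j : Int), ⟨by omega, by omega⟩, ?_⟩
    rw [PySem.List.pyGetD_eq_getElem book "" (by positivity) (by omega),
        PySem.List.pyGetD_eq_getElem book "" (by positivity) (by omega)]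
    simp only [Int.toNat_natCast]
    exact (cond_iff _ _).mpr hrel
  · rintro h ⟨i, ⟨h0, h1⟩, j, ⟨h2, h3⟩, hc⟩
    rw [PySem.List.pyGetD_eq_getElem book "" (by omega) (by omega),
        PySem.List.pyGetD_eq_getElem book "" (by omega) (by omega)] at hc
    exact h i.toNat j.toNat (by omega) (by omega) ((cond_iff _ _).mp hc)

lemma pvScan_cons_pos (num : String) (rest : List String) (s : PySem.Set String)
    (hmem : num ∈ s) : pvScan (num :: rest) s = none := by
  have hc : PySem.Set.contains s num = true := (PySem.Set.contains_iff s num).mpr hmem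
  simp only [pvScan, hc, if_true]

lemma pvScan_cons_neg (num : String) (rest : List String) (s : PySem.Set String)
    (hmem : num ∉ s) : pvScan (num :: rest) s = pvScan rest (PySem.Set.add s num) := by
  have hc : PySem.Set.contains s num = false := by
    rw [← Bool.not_eq_true, PySem.Set.contains_iff s num]; exact hmem
  simp only [pvScan, hc, Bool.false_eq_true, if_false]

lemma pvScan_eq_none_iff (l : List String) : ∀ s : PySem.Set String,
    pvScan l s = none ↔ (∃ x ∈ l, x ∈ s) ∨ ¬ l.Nodup := by
  induction l with
  | nil => intro s; simp [pvScan]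
  | cons num rest ih =>
    intro s
    by_cases hmem : num ∈ s
    · rw [pvScan_cons_pos num rest s hmem]
      simp only [true_iff]
      exact Or.inl ⟨num, List.mem_cons_self, hmem⟩
    · rw [pvScan_cons_neg num rest s hmem, ih]
      simp only [List.nodup_cons, List.mem_cons, not_and_or]
      constructor
      · rintro (⟨x, hx, hxs⟩ | hnd)
        · rcases (PySem.Set.mem_add s num x).mp hxs with h | h
          · exact Or.inl ⟨x, Or.inr hx, h⟩
          · subst h; exact Or.inr (Or.inl (not_not_intro hx))
        · exact Or.inr (Or.inr hnd)
      · rintro (⟨x, hx | hx, hxs⟩ | hnn | hnd)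
        · subst hx; exact absurd hxs hmem
        · exact Or.inl ⟨x, hx, (PySem.Set.mem_add s num x).mpr (Or.inl hxs)⟩
        · exact Or.inl ⟨num, not_not.mp hnn, (PySem.Set.mem_add s num num).mpr (Or.inr rfl)⟩
        · exact Or.inr hnd

lemma pvScan_some_mem (l : List String) : ∀ (s t : PySem.Set String),
    pvScan l s = some t → ∀ x, x ∈ t ↔ x ∈ s ∨ x ∈ l := by
  induction l with
  | nil => intro s t h x; simp [pvScan] at h; subst h; simp
  | cons num rest ih =>
    intro s t h x
    by_cases hmem : num ∈ s
    · rw [pvScan_cons_pos num rest s hmem] at h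
      exact absurd h (by simp)
    · rw [pvScan_cons_neg num rest s hmem] at h
      rw [ih _ _ h x, PySem.Set.mem_add]
      simp only [List.mem_cons]
      tauto

lemma toList_slice_to (num : String) (k : Int) (hk : 0 ≤ k) :
    (PySem.Str.slice num none (some k)).toList = num.toList.take k.toNat := by
  simp [PySem.Str.toList_slice, PySem.List.slice_to num.toList hk]

lemma solB_true_iff (book : List String) : solution_alt book = true ↔ PB book := by
  unfold solution_alt
  cases h : pvScan book PySem.Set.empty with
  | none =>
    have hnd : ¬ book.Nodup := by
      have := (pvScan_eq_none_iff book PySem.Set.empty).mp h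
      rcases this with ⟨x, _, hx⟩ | hnd
      · exact absurd hx (by simp [PySem.Set.empty])
      · exact hnd
    simp [PB, hnd]
  | some seen =>
    have hnd : book.Nodup := by
      by_contra hnd
      have : pvScan book PySem.Set.empty = none :=
        (pvScan_eq_none_iff book PySem.Set.empty).mpr (Or.inr hnd)
      rw [h] at this; exact Option.some_ne_none _ this
    have hmem : ∀ x, x ∈ seen ↔ x ∈ book := by
      intro x
      rw [pvScan_some_mem book _ _ h x]
      simp [PySem.Set.empty]
    have hrw : (!(book.any (fun num =>
        (PySem.List.pyRange 0 (PySem.Str.len num) 1).any (fun k =>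
          PySem.Set.contains seen (PySem.Str.slice num none (some k)))))) = true ↔
        ¬ (∃ num ∈ book, ∃ k : Int, (0 ≤ k ∧ k < PySem.Str.len num) ∧
            PySem.Str.slice num none (some k) ∈ seen) := by
      simp [List.any_eq_true, PySem.List.mem_pyRange_one]
    rw [hrw]
    unfold PB
    simp only [hnd, true_and]
    constructor
    · intro hno num hnum k hk t ht heq
      apply hno
      refine ⟨num, hnum, (k : Int), ⟨by positivity, by rw [PySem.Str.len_eq]; exact_mod_cast hk⟩, ?_⟩
      rw [hmem]
      have hts : PySem.Str.slice num none (some (k : Int)) = t := by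
        apply String.toList_inj.mp
        rw [toList_slice_to num (k : Int) (by positivity), heq, Int.toNat_natCast]
      rw [hts]; exact ht
    · rintro hno ⟨num, hnum, k, ⟨hk0, hk1⟩, hin⟩
      rw [hmem] at hin
      refine hno num hnum k.toNat ?_ _ hin ?_
      · rw [PySem.Str.len_eq] at hk1; omega
      · exact toList_slice_to num k hk0

lemma PA_iff_PB (book : List String) : PA book ↔ PB book := by
  constructor
  · intro hpa
    constructor
    · apply List.pairwise_iff_getElem.mpr
      intro i j hi hj hij heq
      exact hpa i j hij hj (Or.inl (heq ▸ List.prefix_refl _))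
    · intro num hnum k hk t ht heq
      obtain ⟨j0, hj0, hj0e⟩ := List.mem_iff_getElem.mp hnum
      obtain ⟨i0, hi0, hi0e⟩ := List.mem_iff_getElem.mp ht
      have hlen : t.toList.length = k := by
        rw [heq, List.length_take]; omega
      have hpfx : t.toList <+: num.toList := heq ▸ List.take_prefix k num.toList
      have hne : i0 ≠ j0 := by
        intro hcontra
        subst hcontra
        rw [hj0e] at hi0e
        rw [← hi0e] at hlen; omega
      rcases Nat.lt_or_ge i0 j0 with hlt | hge
      · exact hpa i0 j0 hlt hj0 (by rw [hi0e, hj0e]; exact Or.inl hpfx)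
      · have hlt : j0 < i0 := by omega
        exact hpa j0 i0 hlt hi0 (by rw [hi0e, hj0e]; exact Or.inr hpfx)
  · rintro ⟨hnd, hpre⟩ i j h1 h2 hrel
    have hne : book[i]'(Nat.lt_trans h1 h2) ≠ book[j]'h2 :=
      List.pairwise_iff_getElem.mp hnd i j (Nat.lt_trans h1 h2) h2 h1
    rcases hrel with hab | hba
    · rcases Nat.lt_or_ge (book[i]'(Nat.lt_trans h1 h2)).toList.length (book[j]'h2).toList.length with hl | hl
      · refine hpre (book[j]'h2) (List.getElem_mem h2) _ hl (book[i]'(Nat.lt_trans h1 h2))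
          (List.getElem_mem _) ?_
        rw [← List.prefix_iff_eq_take]; exact hab
      · exact hne (String.toList_inj.mp (hab.eq_of_length_le hl))
    · rcases Nat.lt_or_ge (book[j]'h2).toList.length (book[i]'(Nat.lt_trans h1 h2)).toList.length with hl | hl
      · refine hpre (book[i]'(Nat.lt_trans h1 h2)) (List.getElem_mem _) _ hl (book[j]'h2)
          (List.getElem_mem _) ?_
        rw [← List.prefix_iff_eq_take]; exact hba
      · exact hne (String.toList_inj.mp (hba.eq_of_length_le hl)).symm

-- ===== VERDICT (by name: the statement is the Claim_ definition above) =====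
theorem solution_spec : Claim_equal_solution := by
  intro book _
  unfold Spec_solution
  rw [Bool.eq_iff_iff, solA_true_iff, solB_true_iff]
  exact PA_iff_PB book
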